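-- pv_equiv track=rewrite | github.com/juliawuu/retweet-visualizations | tweet_stats.py | infer_diffusion
-- ===== SOURCE A (Python) =====
-- def infer_diffusion(simple_cascade, user_id2friends):
--     inferred_cascade=[]
--     for i in range(1,len(simple_cascade)):
--         link_found=False
--         for j in range(i-1, -1, -1):
--             if simple_cascade[j]['author_id'] in user_id2friends.get(simple_cascade[i]['author_id'],set([])):
--                 inferred_cascade.append((simple_cascade[j]['tweet_id'], simple_cascade[i]['tweet_id']))
--                 link_found=True
--                 break
--         if not link_found:
--             inferred_cascade.append((simple_cascade[0]['tweet_id'], simple_cascade[i]['tweet_id']))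
--     return inferred_cascade
-- ===== SOURCE B (Python) =====
-- def infer_diffusion(simple_cascade, user_id2friends):
--     inferred = []
--     if len(simple_cascade) < 2:
--         return inferred
--     root_tweet = simple_cascade[0]['tweet_id']
--     last_seen = {simple_cascade[0]['author_id']: 0}
--     for i in range(1, len(simple_cascade)):
--         tweet = simple_cascade[i]
--         best = -1
--         for friend in user_id2friends.get(tweet['author_id'], set()):
--             idx = last_seen.get(friend, -1)
--             if best < idx:
--                 best = idx
--         if best >= 0:
--             inferred.append((simple_cascade[best]['tweet_id'], tweet['tweet_id']))
--         else:
--             inferred.append((root_tweet, tweet['tweet_id']))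
--         last_seen[tweet['author_id']] = i
--     return inferred
-- ===== Notes on version B (the rewrite author's own statement) =====
-- stated objective: alternative
-- what changed: Replaces the backward rescan of the whole cascade prefix for every tweet by an incrementally maintained dict mapping each author to the last index where it posted; the most recent friend link is then the max of per-author last-seen indices over the friend set.
import Mathlib
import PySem

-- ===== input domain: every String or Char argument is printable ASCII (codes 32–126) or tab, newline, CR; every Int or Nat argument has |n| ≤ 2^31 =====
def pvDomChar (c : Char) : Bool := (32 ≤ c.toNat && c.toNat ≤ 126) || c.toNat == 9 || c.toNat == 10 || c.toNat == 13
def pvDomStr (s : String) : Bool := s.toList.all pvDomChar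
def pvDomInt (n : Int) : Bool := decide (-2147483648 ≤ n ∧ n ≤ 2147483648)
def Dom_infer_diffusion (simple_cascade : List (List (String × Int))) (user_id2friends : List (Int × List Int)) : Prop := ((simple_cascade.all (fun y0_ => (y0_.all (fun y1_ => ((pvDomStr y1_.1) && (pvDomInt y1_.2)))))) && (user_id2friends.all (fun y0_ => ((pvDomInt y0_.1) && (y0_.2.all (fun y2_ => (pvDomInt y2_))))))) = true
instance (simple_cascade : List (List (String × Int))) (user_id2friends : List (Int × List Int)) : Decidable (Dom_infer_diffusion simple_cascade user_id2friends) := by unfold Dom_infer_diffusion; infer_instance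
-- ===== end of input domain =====

-- B maintains a last-seen-index dict per author instead of rescanning the cascade prefix backwards for every tweet (alternative data structure, same results).


-- shared field/lookup helpers (dict access, first match; defaults only reached outside Pre_)
def pvAuth (sc : List (List (String × Int))) (j : Int) : Int :=
  (PySem.Dict.mk ((PySem.List.pyGet? sc j).getD [])).getD "author_id" 0
def pvTwt (sc : List (List (String × Int))) (j : Int) : Int :=
  (PySem.Dict.mk ((PySem.List.pyGet? sc j).getD [])).getD "tweet_id" 0
def pvFriends (uf : List (Int × List Int)) (a : Int) : List Int :=
  ((PySem.Dict.mk uf).get? a).getD []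

-- ===== PORT A =====
def infer_diffusion (simple_cascade : List (List (String × Int))) (user_id2friends : List (Int × List Int)) : List (Int × Int) :=
  (PySem.List.pyRange 1 simple_cascade.length 1).foldl (fun acc i =>
    let friends := pvFriends user_id2friends (pvAuth simple_cascade i)
    -- inner 'for j in range(i-1, -1, -1): … break' as an Option accumulator
    let found := (PySem.List.pyRange (i - 1) (-1) (-1)).foldl (fun st j =>
      match st with
      | some k => some k
      | none => if friends.contains (pvAuth simple_cascade j) then some j else none)
      (none : Option Int)
    match found with
    | some j => acc ++ [(pvTwt simple_cascade j, pvTwt simple_cascade i)]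
    | none => acc ++ [(pvTwt simple_cascade 0, pvTwt simple_cascade i)]) []

-- ===== PORT B =====
def infer_diffusion_alt (simple_cascade : List (List (String × Int))) (user_id2friends : List (Int × List Int)) : List (Int × Int) :=
  if simple_cascade.length < 2 then []
  else
    let root_tweet := pvTwt simple_cascade 0
    let init : PySem.Dict Int Int := PySem.Dict.empty.insert (pvAuth simple_cascade 0) 0
    ((PySem.List.pyRange 1 simple_cascade.length 1).foldl
      (fun (st : PySem.Dict Int Int × List (Int × Int)) i =>
        let best := (pvFriends user_id2friends (pvAuth simple_cascade i)).foldl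
          (fun b a => let idx := st.1.getD a (-1); if b < idx then idx else b) (-1)
        let pair := if 0 ≤ best then (pvTwt simple_cascade best, pvTwt simple_cascade i)
                    else (root_tweet, pvTwt simple_cascade i)
        (st.1.insert (pvAuth simple_cascade i) i, st.2 ++ [pair]))
      (init, [])).2

-- ===== PRECONDITION & SPEC =====
-- Pre_ excludes exactly the inputs where Python A raises KeyError: a cascade of length ≥ 2
-- in which some tweet dict lacks 'author_id' or 'tweet_id' (every such dict is reached).
def Pre_infer_diffusion (simple_cascade : List (List (String × Int))) (user_id2friends : List (Int × List Int)) : Prop :=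
  simple_cascade.length ≤ 1 ∨
    ∀ d ∈ simple_cascade, (PySem.Dict.mk d).contains "author_id" = true ∧ (PySem.Dict.mk d).contains "tweet_id" = true
instance (simple_cascade : List (List (String × Int))) (user_id2friends : List (Int × List Int)) : Decidable (Pre_infer_diffusion simple_cascade user_id2friends) := by unfold Pre_infer_diffusion; infer_instance
def pvWitness_infer_diffusion : (List (List (String × Int))) × (List (Int × List Int)) :=
  ([[("author_id", 1), ("tweet_id", 10)], [("author_id", 2), ("tweet_id", 20)]], [(2, [1])])

def Spec_infer_diffusion (simple_cascade : List (List (String × Int))) (user_id2friends : List (Int × List Int)) (out : List (Int × Int)) : Prop := out = infer_diffusion_alt simple_cascade user_id2friends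
instance (simple_cascade : List (List (String × Int))) (user_id2friends : List (Int × List Int)) (out : List (Int × Int)) : Decidable (Spec_infer_diffusion simple_cascade user_id2friends out) := by unfold Spec_infer_diffusion; infer_instance

-- ===== CLAIM (what is proved, stated in full; the proofs are below) =====
def Claim_equal_infer_diffusion : Prop := ∀ (simple_cascade : List (List (String × Int))) (user_id2friends : List (Int × List Int)), Dom_infer_diffusion simple_cascade user_id2friends → Pre_infer_diffusion simple_cascade user_id2friends → Spec_infer_diffusion simple_cascade user_id2friends (infer_diffusion simple_cascade user_id2friends)

-- ===== LEMMAS AND PROOFS =====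

-- most recent index j < i satisfying p, as an Int (-1 if none)
def mxP (p : Int → Bool) : Nat → Int
  | 0 => -1
  | (i+1) => if p (i : Int) then (i : Int) else mxP p i

theorem mxP_lt (p : Int → Bool) (i : Nat) : mxP p i < (i : Int) ∧ -1 ≤ mxP p i := by
  induction i with
  | zero => simp [mxP]
  | succ i ih => simp only [mxP]; split <;> push_cast <;> omega

-- the break-loop accumulator is find?
theorem foldl_break (l : List Int) (p : Int → Bool) :
    l.foldl (fun st j => match st with
      | some k => some k
      | none => if p j then some j else none) (none : Option Int) = l.find? p := by
  have aux : ∀ (l : List Int) (k : Int), l.foldl (fun st j => match st with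
      | some k => some k
      | none => if p j then some j else none) (some k) = some k := by
    intro l; induction l with
    | nil => intro k; rfl
    | cons x xs ih => intro k; simpa using ih k
  induction l with
  | nil => rfl
  | cons x xs ih =>
    simp only [List.foldl_cons, List.find?_cons]
    by_cases h : p x = true
    · simp [h, aux]
    · simp at h; simp [h, ih]

-- backward scan = mxP
theorem find_back (p : Int → Bool) (i : Nat) :
    (PySem.List.pyRange ((i : Int) - 1) (-1) (-1)).find? p
      = if 0 ≤ mxP p i then some (mxP p i) else none := by
  induction i with
  | zero =>
    rw [PySem.List.pyRange_neg_one_eq_nil (by norm_num)]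
    simp [mxP]
  | succ i ih =>
    have h1 : ((i + 1 : Nat) : Int) - 1 = (i : Int) := by push_cast; omega
    rw [h1, PySem.List.pyRange_neg_one_cons (by omega)]
    simp only [List.find?_cons, mxP]
    by_cases h : p (i : Int) = true
    · simp [h]
    · simp at h
      simpa [h] using ih

-- generic facts about the max-fold in B
theorem le_foldl_init (h : Int → Int) (l : List Int) (b : Int) :
    b ≤ l.foldl (fun b a => if b < h a then h a else b) b := by
  induction l generalizing b with
  | nil => simp
  | cons x xs ih =>
    simp only [List.foldl_cons]
    refine le_trans ?_ (ih _)
    split <;> omega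

theorem le_foldl_mem (h : Int → Int) (l : List Int) (b : Int) (a : Int) (ha : a ∈ l) :
    h a ≤ l.foldl (fun b a => if b < h a then h a else b) b := by
  induction l generalizing b with
  | nil => simp at ha
  | cons x xs ih =>
    simp only [List.foldl_cons]
    rcases List.mem_cons.1 ha with rfl | ha
    · refine le_trans ?_ (le_foldl_init h xs _)
      split <;> omega
    · exact ih _ ha

theorem foldl_le (h : Int → Int) (l : List Int) (b c : Int) (hb : b ≤ c)
    (hl : ∀ a ∈ l, h a ≤ c) :
    l.foldl (fun b a => if b < h a then h a else b) b ≤ c := by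
  induction l generalizing b with
  | nil => simpa
  | cons x xs ih =>
    simp only [List.foldl_cons]
    refine ih _ ?_ (fun a ha => hl a (List.mem_cons_of_mem _ ha))
    have := hl x (List.mem_cons_self)
    split <;> omega

theorem foldl_congr_fun (h h' : Int → Int) (l : List Int) (b : Int)
    (hc : ∀ a ∈ l, h a = h' a) :
    l.foldl (fun b a => if b < h a then h a else b) b
      = l.foldl (fun b a => if b < h' a then h' a else b) b := by
  induction l generalizing b with
  | nil => rfl
  | cons x xs ih =>
    simp only [List.foldl_cons]
    rw [hc x List.mem_cons_self, ih _ (fun a ha => hc a (List.mem_cons_of_mem _ ha))]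

-- B's per-tweet max over friend last-seen indices = most recent matching prefix index
theorem fold_max_eq (sc : List (List (String × Int))) (F : List Int) (i : Nat) :
    F.foldl (fun b a => if b < mxP (fun j => pvAuth sc j == a) i
                        then mxP (fun j => pvAuth sc j == a) i else b) (-1)
      = mxP (fun j => F.contains (pvAuth sc j)) i := by
  induction i with
  | zero =>
    simp only [mxP]
    have h1 := foldl_le (fun a => mxP (fun j => pvAuth sc j == a) 0) F (-1) (-1) le_rfl
      (fun a _ => by simp [mxP])
    have h2 := le_foldl_init (fun a => mxP (fun j => pvAuth sc j == a) 0) F (-1)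
    beta_reduce at h1 h2
    simp only [mxP] at h1 h2
    omega
  | succ i ih =>
    by_cases hF : F.contains (pvAuth sc (i : Int)) = true
    · -- the author of tweet i is a friend: the max is i itself
      have hmem : pvAuth sc (i : Int) ∈ F := by simpa using hF
      have hup : ∀ a, mxP (fun j => pvAuth sc j == a) (i+1) ≤ (i : Int) := by
        intro a
        simp only [mxP]
        have := (mxP_lt (fun j => pvAuth sc j == a) i).1
        split <;> omega
      have hself : mxP (fun j => pvAuth sc j == pvAuth sc (i : Int)) (i+1) = (i : Int) := by
        simp [mxP]
      have h1 := foldl_le (fun a => mxP (fun j => pvAuth sc j == a) (i+1)) F (-1) (i : Int)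
        (by omega) (fun a _ => hup a)
      have h2 := le_foldl_mem (fun a => mxP (fun j => pvAuth sc j == a) (i+1)) F (-1)
        (pvAuth sc (i : Int)) hmem
      beta_reduce at h1 h2
      rw [hself] at h2
      have hR : mxP (fun j => F.contains (pvAuth sc j)) (i + 1) = (i : Int) := by
        simp only [mxP]
        rw [if_pos hF]
      rw [hR]
      omega
    · -- not a friend: nothing changes at step i
      have hc : ∀ a ∈ F, mxP (fun j => pvAuth sc j == a) (i+1)
          = mxP (fun j => pvAuth sc j == a) i := by
        intro a ha
        have hne : (pvAuth sc (i : Int) == a) = false := by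
          by_contra h
          have : pvAuth sc (i : Int) = a := by
            cases hb : (pvAuth sc (i : Int) == a) with
            | false => exact absurd hb h
            | true => exact eq_of_beq hb
          subst this
          exact absurd (by simpa using ha) (by simpa using hF)
        simp [mxP, hne]
      rw [foldl_congr_fun _ _ F (-1) hc, ih]
      symm
      simp only [mxP]
      rw [if_neg hF]

-- the common per-tweet specification
def entrySpec (sc : List (List (String × Int))) (uf : List (Int × List Int)) (i : Int) : Int × Int :=
  let F := pvFriends uf (pvAuth sc i)
  let b := mxP (fun j => F.contains (pvAuth sc j)) i.toNat
  (if 0 ≤ b then pvTwt sc b else pvTwt sc 0, pvTwt sc i)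

-- A's fold = map of entrySpec
theorem A_eq_map (sc : List (List (String × Int))) (uf : List (Int × List Int)) :
    infer_diffusion sc uf
      = (PySem.List.pyRange 1 sc.length 1).map (entrySpec sc uf) := by
  unfold infer_diffusion
  rw [show (fun (acc : List (Int × Int)) (i : Int) =>
      let friends := pvFriends uf (pvAuth sc i)
      let found := (PySem.List.pyRange (i - 1) (-1) (-1)).foldl (fun st j =>
        match st with
        | some k => some k
        | none => if friends.contains (pvAuth sc j) then some j else none)
        (none : Option Int)
      match found with
      | some j => acc ++ [(pvTwt sc j, pvTwt sc i)]
      | none => acc ++ [(pvTwt sc 0, pvTwt sc i)])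
    = (fun acc i => acc ++ [(fun i =>
      let friends := pvFriends uf (pvAuth sc i)
      let found := (PySem.List.pyRange (i - 1) (-1) (-1)).foldl (fun st j =>
        match st with
        | some k => some k
        | none => if friends.contains (pvAuth sc j) then some j else none)
        (none : Option Int)
      match found with
      | some j => (pvTwt sc j, pvTwt sc i)
      | none => (pvTwt sc 0, pvTwt sc i)) i]) from by
    funext acc i
    simp only
    cases ((PySem.List.pyRange (i - 1) (-1) (-1)).foldl _ (none : Option Int)) <;> rfl]
  rw [PySem.List.foldl_append_singleton_eq_map]
  refine List.map_congr_left ?_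
  intro i hi
  have hi' := (PySem.List.mem_pyRange_one).1 hi
  have h0 : (0 : Int) ≤ i := by omega
  obtain ⟨k, rfl⟩ : ∃ k : Nat, i = (k : Int) := ⟨i.toNat, (Int.toNat_of_nonneg h0).symm⟩
  simp only [entrySpec, Int.toNat_natCast]
  rw [foldl_break, find_back]
  by_cases hb : 0 ≤ mxP (fun j => (pvFriends uf (pvAuth sc (k : Int))).contains (pvAuth sc j)) k
  · simp only [if_pos hb]
  · simp only [if_neg hb]

-- B's fold (from index i with a correct last_seen dict) = map of entrySpec
theorem B_fold (sc : List (List (String × Int))) (uf : List (Int × List Int)) (m : Nat) :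
    ∀ (i : Nat) (d : PySem.Dict Int Int) (out : List (Int × Int)),
    i + m = sc.length → 1 ≤ i →
    (∀ a, d.getD a (-1) = mxP (fun j => pvAuth sc j == a) i) →
    ((PySem.List.pyRange (i : Int) sc.length 1).foldl
      (fun (st : PySem.Dict Int Int × List (Int × Int)) k =>
        let best := (pvFriends uf (pvAuth sc k)).foldl
          (fun b a => let idx := st.1.getD a (-1); if b < idx then idx else b) (-1)
        let pair := if 0 ≤ best then (pvTwt sc best, pvTwt sc k)
                    else (pvTwt sc 0, pvTwt sc k)
        (st.1.insert (pvAuth sc k) k, st.2 ++ [pair]))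
      (d, out)).2
    = out ++ (PySem.List.pyRange (i : Int) sc.length 1).map (entrySpec sc uf) := by
  induction m with
  | zero =>
    intro i d out hn _ _
    rw [PySem.List.pyRange_one_eq_nil (by omega)]
    simp
  | succ m ih =>
    intro i d out hn h1 hinv
    rw [PySem.List.pyRange_one_cons (by push_cast; omega)]
    simp only [List.foldl_cons, List.map_cons]
    have hbest : (pvFriends uf (pvAuth sc (i : Int))).foldl
        (fun b a => let idx := d.getD a (-1); if b < idx then idx else b) (-1)
        = mxP (fun j => (pvFriends uf (pvAuth sc (i : Int))).contains (pvAuth sc j)) i := by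
      rw [← fold_max_eq sc (pvFriends uf (pvAuth sc (i : Int))) i]
      exact foldl_congr_fun _ _ _ _ (fun a _ => hinv a)
    have hinv' : ∀ a, (d.insert (pvAuth sc (i : Int)) (i : Int)).getD a (-1)
        = mxP (fun j => pvAuth sc j == a) (i+1) := by
      intro a
      rw [PySem.Dict.getD_insert]
      simp only [mxP]
      by_cases hq : pvAuth sc (i : Int) = a
      · simp [hq]
      · have hba : (pvAuth sc (i : Int) == a) = false := by simpa using hq
        rw [if_neg (fun h => hq h.symm), hinv a]
        simp [hba]
    have hstep := ih (i+1) (d.insert (pvAuth sc (i : Int)) (i : Int))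
      (out ++ [if 0 ≤ mxP (fun j => (pvFriends uf (pvAuth sc (i : Int))).contains (pvAuth sc j)) i
               then (pvTwt sc (mxP (fun j => (pvFriends uf (pvAuth sc (i : Int))).contains (pvAuth sc j)) i), pvTwt sc (i : Int))
               else (pvTwt sc 0, pvTwt sc (i : Int))])
      (by omega) (by omega) hinv'
    simp only [hbest]
    have hc : ((i : Int) + 1) = (((i+1 : Nat)) : Int) := by push_cast; ring
    rw [hc, hstep]
    have hes : entrySpec sc uf (i : Int)
        = if 0 ≤ mxP (fun j => (pvFriends uf (pvAuth sc (i : Int))).contains (pvAuth sc j)) i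
          then (pvTwt sc (mxP (fun j => (pvFriends uf (pvAuth sc (i : Int))).contains (pvAuth sc j)) i), pvTwt sc (i : Int))
          else (pvTwt sc 0, pvTwt sc (i : Int)) := by
      simp only [entrySpec, Int.toNat_natCast]
      split <;> rfl
    rw [hes, List.append_assoc]
    rfl

theorem B_eq_map (sc : List (List (String × Int))) (uf : List (Int × List Int)) :
    infer_diffusion_alt sc uf
      = (PySem.List.pyRange 1 sc.length 1).map (entrySpec sc uf) := by
  unfold infer_diffusion_alt
  split
  · next h =>
    rw [PySem.List.pyRange_one_eq_nil (by omega)]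
    rfl
  · next h =>
    have hinv : ∀ a, (PySem.Dict.empty.insert (pvAuth sc 0) (0 : Int)).getD a (-1)
        = mxP (fun j => pvAuth sc j == a) 1 := by
      intro a
      rw [PySem.Dict.getD_insert]
      simp only [mxP]
      by_cases hq : pvAuth sc 0 = a
      · simp [hq]
      · have hba : (pvAuth sc (0 : Int) == a) = false := by simpa using hq
        rw [if_neg (fun h => hq h.symm)]
        simp [hba, PySem.Dict.getD_empty]
    have := B_fold sc uf (sc.length - 1) 1 (PySem.Dict.empty.insert (pvAuth sc 0) 0) []
      (by omega) le_rfl hinv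
    simpa using this

-- ===== VERDICT (by name: the statement is the Claim_ definition above) =====
theorem infer_diffusion_spec : Claim_equal_infer_diffusion := by
  intro sc uf _ _
  unfold Spec_infer_diffusion
  rw [A_eq_map, B_eq_map]
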